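-- pv_equiv track=rewrite | github.com/sivaramanrajagopal/Mundane-Astrology | predictor.py | get_country_summary
-- ===== SOURCE A (Python) =====
-- HIGH_RISK_THRESHOLD   = 3
--
-- HIGH_GROWTH_THRESHOLD = 2
--
-- def get_country_summary(categories: dict) -> str:
--     volatile = sum(1 for v in categories.values() if v == "Volatility/Crisis")
--     positive = sum(1 for v in categories.values() if v == "Positive/Growth")
--     if volatile >= HIGH_RISK_THRESHOLD:
--         return "High Risk"
--     if positive >= HIGH_GROWTH_THRESHOLD:
--         return "High Growth"
--     return "Mixed"
-- ===== SOURCE B (Python) =====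
-- HIGH_RISK_THRESHOLD   = 3
--
-- HIGH_GROWTH_THRESHOLD = 2
--
-- def get_country_summary(categories: dict) -> str:
--     vol = 0
--     pos = 0
--     for v in categories.values():
--         if v == "Volatility/Crisis":
--             vol += 1
--             if vol >= HIGH_RISK_THRESHOLD:
--                 return "High Risk"
--         elif v == "Positive/Growth":
--             pos += 1
--     return "High Growth" if pos >= HIGH_GROWTH_THRESHOLD else "Mixed"
-- ===== Notes on version B (the rewrite author's own statement) =====
-- stated objective: alternative
-- what changed: B replaces A's two separate filtered generator sums over the whole value list with one explicit loop carrying both counters as accumulators and returning 'High Risk' early the moment the risk counter reaches its threshold.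
import Mathlib
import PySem

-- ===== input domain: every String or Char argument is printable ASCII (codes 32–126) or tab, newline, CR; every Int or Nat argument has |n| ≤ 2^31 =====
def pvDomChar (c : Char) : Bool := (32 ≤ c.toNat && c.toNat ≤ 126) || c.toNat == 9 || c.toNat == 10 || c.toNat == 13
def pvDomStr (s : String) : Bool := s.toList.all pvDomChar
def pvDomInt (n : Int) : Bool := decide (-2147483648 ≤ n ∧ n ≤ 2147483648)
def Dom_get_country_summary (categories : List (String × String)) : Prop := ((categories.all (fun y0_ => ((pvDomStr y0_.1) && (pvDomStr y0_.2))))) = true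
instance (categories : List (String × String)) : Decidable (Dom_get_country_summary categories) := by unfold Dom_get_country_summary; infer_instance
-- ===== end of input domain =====

-- B replaces A's two filtered full scans with one loop carrying both
-- counters and exiting early when the risk counter reaches its threshold;
-- return values proved equal on all inputs.

-- ===== PORT A =====
def get_country_summary (categories : List (String × String)) : String :=
  let vals := (PySem.Dict.ofList categories).values
  let volatile : Int := ((vals.map (fun v => if v == "Volatility/Crisis" then (1:Int) else 0)).sum)
  let positive : Int := ((vals.map (fun v => if v == "Positive/Growth" then (1:Int) else 0)).sum)
  if volatile ≥ 3 then "High Risk"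
  else if positive ≥ 2 then "High Growth"
  else "Mixed"

-- ===== PORT B =====
def summaryGo (vals : List String) (vol pos : Int) : String :=
  match vals with
  | [] => if pos ≥ 2 then "High Growth" else "Mixed"
  | v :: rest =>
      if v == "Volatility/Crisis" then
        if vol + 1 ≥ 3 then "High Risk" else summaryGo rest (vol + 1) pos
      else if v == "Positive/Growth" then summaryGo rest vol (pos + 1)
      else summaryGo rest vol pos

def get_country_summary_alt (categories : List (String × String)) : String :=
  summaryGo (PySem.Dict.ofList categories).values 0 0

-- ===== PRECONDITION & SPEC =====
def Spec_get_country_summary (categories : List (String × String)) (out : String) : Prop := out = get_country_summary_alt categories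
instance (categories : List (String × String)) (out : String) : Decidable (Spec_get_country_summary categories out) := by unfold Spec_get_country_summary; infer_instance

-- ===== CLAIM =====
def Claim_equal_get_country_summary : Prop := ∀ (categories : List (String × String)), Dom_get_country_summary categories → Spec_get_country_summary categories (get_country_summary categories)

-- ===== LEMMAS AND PROOFS =====
theorem summaryGo_spec (vals : List String) (vol pos : Int) (hv : vol < 3) :
    summaryGo vals vol pos =
      if vol + (vals.count "Volatility/Crisis" : Int) ≥ 3 then "High Risk"
      else if pos + (vals.count "Positive/Growth" : Int) ≥ 2 then "High Growth"
      else "Mixed" := by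
  induction vals generalizing vol pos with
  | nil => simp [summaryGo]; omega
  | cons v rest ih =>
    rw [summaryGo]
    have hc : ((v :: rest).count "Volatility/Crisis" : Int) =
        (if v == "Volatility/Crisis" then 1 else 0) + (rest.count "Volatility/Crisis" : Int) := by
      rw [List.count_cons]; push_cast; split <;> omega
    have hp : ((v :: rest).count "Positive/Growth" : Int) =
        (if v == "Positive/Growth" then 1 else 0) + (rest.count "Positive/Growth" : Int) := by
      rw [List.count_cons]; push_cast; split <;> omega
    rw [hc, hp]
    by_cases h1 : v == "Volatility/Crisis"
    · rw [beq_iff_eq] at h1; subst h1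
      simp only [beq_self_eq_true, if_true,
        show (("Volatility/Crisis" : String) == "Positive/Growth") = false from by decide,
        Bool.false_eq_true, if_false]
      by_cases h2 : vol + 1 ≥ 3
      · have hcn : (0:Int) ≤ (rest.count "Volatility/Crisis" : Int) := by positivity
        rw [if_pos h2, if_pos (by omega)]
      · rw [if_neg h2, ih (vol + 1) pos (by omega)]
        have hcp : (0:Int) ≤ (rest.count "Positive/Growth" : Int) := by positivity
        split_ifs <;> first | rfl | omega
    · rw [Bool.not_eq_true] at h1
      simp only [h1, Bool.false_eq_true, if_false]
      by_cases h2 : v == "Positive/Growth"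
      · simp only [h2, if_true]
        rw [ih vol (pos + 1) hv]
        split_ifs <;> first | rfl | omega
      · rw [Bool.not_eq_true] at h2
        simp only [h2, Bool.false_eq_true, if_false]
        rw [ih vol pos hv]
        split_ifs <;> first | rfl | omega

theorem sum_ite_eq_count (vals : List String) (s : String) :
    ((vals.map (fun v => if v == s then (1:Int) else 0)).sum) = (vals.count s : Int) := by
  induction vals with
  | nil => simp
  | cons v rest ih =>
    simp only [List.map_cons, List.sum_cons, ih, List.count_cons]
    split <;> simp_all <;> omega

-- ===== VERDICT =====
theorem get_country_summary_spec : Claim_equal_get_country_summary := by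
  intro categories _
  unfold Spec_get_country_summary get_country_summary get_country_summary_alt
  rw [summaryGo_spec _ _ _ (by omega)]
  simp only [sum_ite_eq_count, zero_add]
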